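-- pv_equiv track=rewrite | github.com/bldldodldo/build_and_run | build_and_run.py | mov_g
-- ===== SOURCE A (Python) =====
-- def mov_g(x,y,terrain,m,mom,marq):
--     """Fonction de déplacement vers la gauche.
-- Modifie la liste par effet de bord."""
--     if not (y-1 >= 0 and terrain[x][y-1] == 0) and m == mom:
--         m = 0
--         mom += 3
--     while m > 0:
--         if y-1 >= 0 and terrain[x][y-1] == 0:
--             terrain[x][y] = 0
--             y -=1
--             m -= 1
--             terrain[x][y] = marq
--             if m == 0:
--                 mom += 1
--         else:
--             m = 0
--     return (x,y,m,mom)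
-- ===== SOURCE B (Python) =====
-- def mov_g(x, y, terrain, m, mom, marq):
--     """Left move, recomputed: count the free cells in the left window first,
--     then do the two endpoint writes (same in-place terrain mutation as the original)."""
--     if m == mom and not (y - 1 >= 0 and terrain[x][y - 1] == 0):
--         return (x, y, 0, mom + 3)
--     if m <= 0:
--         return (x, y, m, mom)
--     if y <= 0:
--         return (x, y, 0, mom)
--     row = terrain[x]
--     window = row[max(y - m, 0):y]
--     steps = 0
--     for v in reversed(window):
--         if v != 0:
--             break
--         steps += 1
--     if steps == 0:
--         return (x, y, 0, mom)
--     row[y] = 0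
--     row[y - steps] = marq
--     return (x, y - steps, 0, mom + (1 if steps == m else 0))
-- ===== Notes on version B (the rewrite author's own statement) =====
-- stated objective: simpler
-- what changed: A's stateful while-loop (which re-reads and mutates the terrain at every step and threads y/m/mom through it) is replaced by: count the consecutive free cells in the left window of the original row, then compute the new position, the mom bonus and the two endpoint writes in one shot.
import Mathlib
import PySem

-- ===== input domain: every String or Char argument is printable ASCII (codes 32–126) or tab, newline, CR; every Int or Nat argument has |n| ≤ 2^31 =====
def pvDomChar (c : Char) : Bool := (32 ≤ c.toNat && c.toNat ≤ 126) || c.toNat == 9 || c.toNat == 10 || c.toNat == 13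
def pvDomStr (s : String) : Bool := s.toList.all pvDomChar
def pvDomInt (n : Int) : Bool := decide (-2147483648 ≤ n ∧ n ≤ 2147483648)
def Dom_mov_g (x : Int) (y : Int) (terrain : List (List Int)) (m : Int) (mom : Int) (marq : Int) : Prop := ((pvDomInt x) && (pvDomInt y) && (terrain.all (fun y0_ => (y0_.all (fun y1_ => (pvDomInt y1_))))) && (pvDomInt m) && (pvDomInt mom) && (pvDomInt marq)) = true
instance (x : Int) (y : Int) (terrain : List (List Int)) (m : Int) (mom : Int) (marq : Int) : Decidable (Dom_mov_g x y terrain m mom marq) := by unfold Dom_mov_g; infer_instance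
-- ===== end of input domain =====

-- B recomputes the move as "count the free cells in the left window, then write the two endpoints"
-- instead of A's stateful while-loop that mutates as it scans; objective: simpler. Both Pythons
-- mutate `terrain` identically on Pre_; the equivalence proved here is about the RETURN value.

-- ===== PORT A =====
-- terrain[x][j] as a read (Python index semantics; the default 1 is never hit inside Pre_)
def cellA (t : List (List Int)) (x j : Int) : Int :=
  (PySem.List.pyGet? ((PySem.List.pyGet? t x).getD []) j).getD 1

-- terrain[x][j] = v (in-place in Python; a no-op where Python would raise — excluded by Pre_)
def setCellA (t : List (List Int)) (x j v : Int) : List (List Int) :=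
  PySem.List.pySetD t x (PySem.List.pySetD ((PySem.List.pyGet? t x).getD []) j v)

-- the `while m > 0` loop of A, state (y, terrain, m, mom)
def movLoop (x : Int) (y : Int) (terrain : List (List Int)) (m : Int) (mom : Int) (marq : Int) : Int × Int × Int × Int :=
  if 0 < m then
    if y - 1 ≥ 0 ∧ cellA terrain x (y - 1) = 0 then
      let t1 := setCellA terrain x y 0
      let y' := y - 1
      let m' := m - 1
      let t2 := setCellA t1 x y' marq
      let mom' := if m' = 0 then mom + 1 else mom
      movLoop x y' t2 m' mom' marq
    else
      movLoop x y terrain 0 mom marq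
  else (x, y, m, mom)
termination_by m.toNat
decreasing_by all_goals omega

def mov_g (x : Int) (y : Int) (terrain : List (List Int)) (m : Int) (mom : Int) (marq : Int) : Int × Int × Int × Int :=
  -- the initial guard reassigns (m, mom) before the loop
  if ¬(y - 1 ≥ 0 ∧ cellA terrain x (y - 1) = 0) ∧ m = mom then
    movLoop x y terrain 0 (mom + 3) marq
  else
    movLoop x y terrain m mom marq

-- ===== PORT B =====
-- the `for v in reversed(window): if v != 0: break; steps += 1` counter
def countFree : List Int → Int
  | [] => 0
  | v :: r => if v ≠ 0 then 0 else 1 + countFree r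

def mov_g_alt (x : Int) (y : Int) (terrain : List (List Int)) (m : Int) (mom : Int) (marq : Int) : Int × Int × Int × Int :=
  if m = mom ∧ ¬(y - 1 ≥ 0 ∧ (PySem.List.pyGet? ((PySem.List.pyGet? terrain x).getD []) (y - 1)).getD 1 = 0) then
    (x, y, 0, mom + 3)
  else if m ≤ 0 then (x, y, m, mom)
  else if y ≤ 0 then (x, y, 0, mom)
  else
    let row := (PySem.List.pyGet? terrain x).getD []
    let window := PySem.List.slice row (some (max (y - m) 0)) (some y)
    let steps := countFree window.reverse
    -- the two in-place endpoint writes row[y] = 0, row[y - steps] = marq do not affect the return value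
    if steps = 0 then (x, y, 0, mom)
    else (x, y - steps, 0, mom + (if steps = m then 1 else 0))

-- ===== PRECONDITION & SPEC =====
-- Exactly the inputs where Python A returns (no IndexError): with y ≥ 1 it reads terrain[x][y-1],
-- and writes terrain[x][y] as soon as one step is taken (which needs y < len(terrain[x])).
def Pre_mov_g (x : Int) (y : Int) (terrain : List (List Int)) (m : Int) (mom : Int) (marq : Int) : Prop :=
  y ≤ 0 ∨
    (-(terrain.length : Int) ≤ x ∧ x < (terrain.length : Int) ∧
      (let row := (PySem.List.pyGet? terrain x).getD []
       y ≤ (row.length : Int) ∧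
        ¬(y = (row.length : Int) ∧ 0 < m ∧ (PySem.List.pyGet? row (y - 1)).getD 1 = 0)))
instance (x : Int) (y : Int) (terrain : List (List Int)) (m : Int) (mom : Int) (marq : Int) : Decidable (Pre_mov_g x y terrain m mom marq) := by unfold Pre_mov_g; infer_instance

def pvWitness_mov_g : Int × Int × List (List Int) × Int × Int × Int := (0, 2, [[0, 0, 5]], 2, 2, 7)

def Spec_mov_g (x : Int) (y : Int) (terrain : List (List Int)) (m : Int) (mom : Int) (marq : Int) (out : Int × Int × Int × Int) : Prop := out = mov_g_alt x y terrain m mom marq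
instance (x : Int) (y : Int) (terrain : List (List Int)) (m : Int) (mom : Int) (marq : Int) (out : Int × Int × Int × Int) : Decidable (Spec_mov_g x y terrain m mom marq out) := by unfold Spec_mov_g; infer_instance

-- ===== CLAIM (what is proved, stated in full; the proofs are below) =====
def Claim_equal_mov_g : Prop := ∀ (x : Int) (y : Int) (terrain : List (List Int)) (m : Int) (mom : Int) (marq : Int), Dom_mov_g x y terrain m mom marq → Pre_mov_g x y terrain m mom marq → Spec_mov_g x y terrain m mom marq (mov_g x y terrain m mom marq)

-- ===== LEMMAS AND PROOFS =====

lemma pyIdx?_some_lt {n : Nat} {i : Int} {k : Nat} (h : PySem.List.pyIdx? n i = some k) : k < n := by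
  unfold PySem.List.pyIdx? at h; split_ifs at h <;> simp_all <;> omega

lemma pyIdx?_of_nonneg {n : Nat} {i : Int} (h : 0 ≤ i) :
    PySem.List.pyIdx? n i = if i < (n : Int) then some i.toNat else none := by
  unfold PySem.List.pyIdx?; split_ifs <;> simp_all <;> omega

-- a write at column j does not change a read at a different column j' (both nonnegative)
lemma cellA_setCellA_ne (t : List (List Int)) (x j j' v : Int)
    (hj : 0 ≤ j) (hj' : 0 ≤ j') (hne : j ≠ j') :
    cellA (setCellA t x j v) x j' = cellA t x j' := by
  unfold cellA setCellA
  unfold PySem.List.pySetD PySem.List.pySet? PySem.List.pyGet?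
  cases hk : PySem.List.pyIdx? t.length x with
  | none => simp [hk]
  | some k =>
    have hklt := pyIdx?_some_lt hk
    simp only [hk, Option.map_some, Option.getD_some, List.length_set, Option.bind_some]
    rw [List.getElem?_set_self]
    · set row : List Int := t[k]?.getD [] with hrow
      simp only [Option.getD_some]
      cases hkj : PySem.List.pyIdx? row.length j with
      | none => simp
      | some kj =>
        have hkjlt := pyIdx?_some_lt hkj
        have hkjv : kj = j.toNat := by
          rw [pyIdx?_of_nonneg hj] at hkj; split_ifs at hkj <;> simp_all
        simp only [Option.map_some, Option.getD_some, List.length_set]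
        rw [pyIdx?_of_nonneg hj']
        split_ifs with h1
        · simp only [Option.bind_some]
          rw [List.getElem?_set_ne]
          omega
        · simp
    · exact hklt

-- strip the last element of a window slice
lemma slice_snoc (row : List Int) (lo y : Int) (h0 : 0 ≤ lo) (hlt : lo < y)
    (hle : y ≤ (row.length : Int)) :
    PySem.List.slice row (some lo) (some y) =
      PySem.List.slice row (some lo) (some (y - 1)) ++ [(PySem.List.pyGet? row (y - 1)).getD 1] := by
  rw [PySem.List.slice_toNat row h0 (by omega), PySem.List.slice_toNat row h0 (by omega),
    PySem.List.pyGet?_of_nonneg _ (by omega : (0:Int) ≤ y - 1)]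
  have hy : y.toNat - lo.toNat = ((y-1).toNat - lo.toNat) + 1 := by omega
  rw [hy, List.take_add_one]
  congr 1
  have : (row.drop lo.toNat)[(y-1).toNat - lo.toNat]? = row[(y-1).toNat]? := by
    rw [List.getElem?_drop]; congr 1; omega
  rw [this, List.getElem?_eq_getElem (by omega)]
  simp

lemma movLoop_exit (x y : Int) (t : List (List Int)) (m mom marq : Int) (h : ¬ 0 < m) :
    movLoop x y t m mom marq = (x, y, m, mom) := by
  rw [movLoop, if_neg h]

lemma movLoop_step_move (x y : Int) (t : List (List Int)) (m mom marq : Int)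
    (hm : 0 < m) (hc : y - 1 ≥ 0 ∧ cellA t x (y - 1) = 0) :
    movLoop x y t m mom marq =
      movLoop x (y - 1) (setCellA (setCellA t x y 0) x (y - 1) marq) (m - 1)
        (if m - 1 = 0 then mom + 1 else mom) marq := by
  rw [movLoop, if_pos hm, if_pos hc]

lemma movLoop_step_stop (x y : Int) (t : List (List Int)) (m mom marq : Int)
    (hm : 0 < m) (hc : ¬ (y - 1 ≥ 0 ∧ cellA t x (y - 1) = 0)) :
    movLoop x y t m mom marq = (x, y, 0, mom) := by
  rw [movLoop, if_pos hm, if_neg hc, movLoop_exit] ; omega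

lemma movLoop_eq (n : Nat) : ∀ (x y : Int) (t : List (List Int)) (m mom marq : Int)
    (row : List Int),
    m.toNat = n → 0 < m → 0 < y → y ≤ (row.length : Int) →
    (∀ j : Int, 0 ≤ j → j < y → cellA t x j = (PySem.List.pyGet? row j).getD 1) →
    movLoop x y t m mom marq =
      (x, y - countFree (PySem.List.slice row (some (max (y - m) 0)) (some y)).reverse, 0,
        mom + (if countFree (PySem.List.slice row (some (max (y - m) 0)) (some y)).reverse = m then 1 else 0)) := by
  induction n with
  | zero => intro x y t m mom marq row hn hm _ _ _; omega
  | succ n ih =>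
    intro x y t m mom marq row hn hm hy hylen H
    have hread : cellA t x (y - 1) = (PySem.List.pyGet? row (y - 1)).getD 1 :=
      H (y - 1) (by omega) (by omega)
    have hlo0 : (0:Int) ≤ max (y - m) 0 := le_max_right _ _
    have hloy : max (y - m) 0 < y := by omega
    have hsnoc := slice_snoc row (max (y - m) 0) y hlo0 hloy hylen
    by_cases hc : (PySem.List.pyGet? row (y - 1)).getD 1 = 0
    · rw [movLoop_step_move x y t m mom marq hm ⟨by omega, by rw [hread]; exact hc⟩]
      have hsteps : countFree (PySem.List.slice row (some (max (y - m) 0)) (some y)).reverse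
          = 1 + countFree (PySem.List.slice row (some (max (y - m) 0)) (some (y - 1))).reverse := by
        rw [hsnoc, hc, List.reverse_append]
        simp [countFree]
      by_cases hm1 : m - 1 = 0
      · rw [if_pos hm1, movLoop_exit _ _ _ _ _ _ (by omega)]
        have hm2 : m = 1 := by omega
        have hloe : max (y - m) 0 = y - 1 := by omega
        have hnil : PySem.List.slice row (some (y - 1)) (some (y - 1)) = [] := by
          rw [PySem.List.slice_toNat row (by omega) (by omega)]; simp
        rw [hsteps, hloe, hnil]
        simp [countFree, hm2]
      · rw [if_neg hm1]
        by_cases hy1 : y = 1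
        · rw [movLoop_step_stop _ _ _ _ _ _ (by omega) (by intro h; omega)]
          rw [hsteps]
          have hloe : max (y - m) 0 = 0 := by omega
          have hnil : PySem.List.slice row (some (max (y - m) 0)) (some (y - 1)) = [] := by
            rw [hloe, PySem.List.slice_toNat row (by omega) (by omega)]
            simp [hy1]
          rw [hnil]
          have e0 : countFree ([] : List Int).reverse = 0 := rfl
          rw [e0, if_neg (by omega)]
          rw [hy1]
          norm_num
        · have H' : ∀ j : Int, 0 ≤ j → j < y - 1 →
              cellA (setCellA (setCellA t x y 0) x (y - 1) marq) x j
                = (PySem.List.pyGet? row j).getD 1 := by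
            intro j hj hjy
            rw [cellA_setCellA_ne _ _ _ _ _ (by omega) hj (by omega),
              cellA_setCellA_ne _ _ _ _ _ (by omega) hj (by omega)]
            exact H j hj (by omega)
          have hrec := ih x (y - 1) (setCellA (setCellA t x y 0) x (y - 1) marq) (m - 1) mom marq
            row (by omega) (by omega) (by omega) (by omega) H'
          have hloe : max ((y - 1) - (m - 1)) 0 = max (y - m) 0 := by omega
          rw [hloe] at hrec
          rw [hrec, hsteps]
          have e1 : y - 1 - countFree (PySem.List.slice row (some (max (y - m) 0)) (some (y - 1))).reverse
              = y - (1 + countFree (PySem.List.slice row (some (max (y - m) 0)) (some (y - 1))).reverse) := by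
            omega
          have e2 : (countFree (PySem.List.slice row (some (max (y - m) 0)) (some (y - 1))).reverse = m - 1)
              ↔ (1 + countFree (PySem.List.slice row (some (max (y - m) 0)) (some (y - 1))).reverse = m) := by
            constructor <;> (intro; omega)
          rw [e1]
          simp only [e2]
    · rw [movLoop_step_stop _ _ _ _ _ _ hm (by rw [hread]; intro h; exact hc h.2)]
      have hsteps : countFree (PySem.List.slice row (some (max (y - m) 0)) (some y)).reverse = 0 := by
        rw [hsnoc, List.reverse_append]
        simp [countFree, hc]
      rw [hsteps, if_neg (by omega)]
      norm_num

theorem mov_g_spec : Claim_equal_mov_g := by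
  intro x y terrain m mom marq _ hpre
  unfold Spec_mov_g mov_g mov_g_alt
  have hcell : cellA terrain x (y - 1)
      = (PySem.List.pyGet? ((PySem.List.pyGet? terrain x).getD []) (y - 1)).getD 1 := rfl
  by_cases hg : ¬(y - 1 ≥ 0 ∧ cellA terrain x (y - 1) = 0) ∧ m = mom
  · rw [if_pos hg, if_pos ⟨hg.2, by rw [← hcell]; exact hg.1⟩,
      movLoop_exit _ _ _ _ _ _ (by omega)]
  · rw [if_neg hg, if_neg (by rw [← hcell]; tauto)]
    by_cases hm0 : m ≤ 0
    · rw [if_pos hm0, movLoop_exit _ _ _ _ _ _ (by omega)]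
    · rw [if_neg hm0]
      by_cases hy0 : y ≤ 0
      · rw [if_pos hy0, movLoop_step_stop _ _ _ _ _ _ (by omega) (by intro h; omega)]
      · rw [if_neg hy0]
        have hylen : y ≤ (((PySem.List.pyGet? terrain x).getD []).length : Int) := by
          rcases hpre with h | h
          · omega
          · exact h.2.2.1
        rw [movLoop_eq m.toNat x y terrain m mom marq ((PySem.List.pyGet? terrain x).getD [])
          rfl (by omega) (by omega) hylen (fun j _ _ => rfl)]
        simp only []
        by_cases hs : countFree (PySem.List.slice ((PySem.List.pyGet? terrain x).getD [])
            (some (max (y - m) 0)) (some y)).reverse = 0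
        · rw [if_pos hs, hs, if_neg (by omega)]
          norm_num
        · rw [if_neg hs]
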